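-- pv_equiv track=rewrite | github.com/stream-enterer/Sylvanshine | duelyst_analysis/scripts/trace_imports.py | trace_imports
-- ===== SOURCE A (Python) =====
-- def normalize_path(path: str) -> str:
--     """Normalize file path for matching."""
--     # Remove leading ./ or /
--     path = path.lstrip("./")
--     # Handle paths without extensions
--     if not any(path.endswith(ext) for ext in [".coffee", ".js", ".ts"]):
--         # Try common extensions
--         for ext in [".coffee", ".js"]:
--             if f"{path}{ext}" in path:
--                 return f"{path}{ext}"
--     return path
--
-- def find_file_in_graph(graph: dict[str, list[tuple[str, str, str]]], search_path: str) -> str | None: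
--     """Find a file in the graph matching the search path."""
--     normalized = normalize_path(search_path)
--
--     # Exact match
--     if normalized in graph:
--         return normalized
--
--     # Partial match
--     for file in graph.keys():
--         if file.endswith(normalized) or normalized in file:
--             return file
--
--     return None
--
-- def trace_imports(
--     graph: dict[str, list[tuple[str, str, str]]],
--     file: str,
--     visited: set[str] | None = None,
--     depth: int = 0,
--     max_depth: int = 10
-- ) -> dict[str, list[tuple[str, str, str]]]:
--     """Recursively trace all imports."""
--     if visited is None:
--         visited = set()
--
--     if file in visited or depth > max_depth:
--         return {}
--
--     visited.add(file)
--     result: dict[str, list[tuple[str, str, str]]] = {}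
--
--     if file in graph:
--         result[file] = graph[file]
--
--         for import_type, module, resolved in graph[file]:
--             if resolved and resolved not in visited:
--                 # Check if resolved file exists in graph
--                 resolved_file = find_file_in_graph(graph, resolved)
--                 if resolved_file:
--                     child_imports = trace_imports(graph, resolved_file, visited, depth + 1, max_depth)
--                     result.update(child_imports)
--
--     return result
-- ===== SOURCE B (Python) =====
-- def normalize_path(path: str) -> str:
--     """Normalize file path for matching."""
--     path = path.lstrip("./")
--     if not any(path.endswith(ext) for ext in [".coffee", ".js", ".ts"]):
--         for ext in [".coffee", ".js"]:
--             if f"{path}{ext}" in path: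
--                 return f"{path}{ext}"
--     return path
--
-- def find_file_in_graph(graph, search_path):
--     """Find a file in the graph matching the search path."""
--     normalized = normalize_path(search_path)
--     if normalized in graph:
--         return normalized
--     for file in graph.keys():
--         if file.endswith(normalized) or normalized in file:
--             return file
--     return None
--
-- def trace_imports(graph, file, visited=None, depth=0, max_depth=10):
--     """Iterative worklist DFS with an explicit stack of visit/edge items;
--     a single result accumulator replaces the per-call dict merging."""
--     if visited is None:
--         visited = set()
--     result = {}
--     stack = [("visit", file, depth)]
--     while stack:
--         kind, name, d = stack.pop()
--         if kind == "visit":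
--             if name in visited or d > max_depth:
--                 continue
--             visited.add(name)
--             if name in graph:
--                 edges = graph[name]
--                 result[name] = edges
--                 stack.extend(("edge", r, d) for _t, _m, r in reversed(edges))
--         else:  # pending edge: guard sees the *live* visited set
--             if name and name not in visited:
--                 rf = find_file_in_graph(graph, name)
--                 if rf:
--                     stack.append(("visit", rf, d + 1))
--     return result
-- ===== Notes on version B (the rewrite author's own statement) =====
-- stated objective: alternative
-- what changed: Replaces A's recursive DFS, which builds a result dict per call and merges child dicts via dict.update, with an iterative DFS driven by an explicit worklist stack of visit/edge items and a single result accumulator; pending-edge items keep the `resolved not in visited` guard evaluated against the live visited set exactly as in the recursion.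
import Mathlib
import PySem

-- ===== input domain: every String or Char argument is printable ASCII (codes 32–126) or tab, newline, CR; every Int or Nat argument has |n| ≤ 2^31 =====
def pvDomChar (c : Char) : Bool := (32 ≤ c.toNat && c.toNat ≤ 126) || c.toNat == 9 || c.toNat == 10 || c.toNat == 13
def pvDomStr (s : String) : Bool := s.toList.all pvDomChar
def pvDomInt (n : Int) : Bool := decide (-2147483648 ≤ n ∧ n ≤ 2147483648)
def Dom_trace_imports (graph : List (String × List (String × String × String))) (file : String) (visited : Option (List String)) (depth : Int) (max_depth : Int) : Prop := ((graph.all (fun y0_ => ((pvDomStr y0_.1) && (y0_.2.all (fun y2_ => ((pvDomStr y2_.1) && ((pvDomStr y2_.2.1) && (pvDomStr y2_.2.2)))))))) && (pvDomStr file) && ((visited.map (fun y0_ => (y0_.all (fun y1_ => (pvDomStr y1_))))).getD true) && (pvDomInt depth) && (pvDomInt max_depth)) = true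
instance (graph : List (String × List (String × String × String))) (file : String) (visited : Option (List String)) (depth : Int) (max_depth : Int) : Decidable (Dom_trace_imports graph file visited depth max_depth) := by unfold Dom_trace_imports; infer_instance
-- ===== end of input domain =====

-- B replaces A's recursive DFS (per-call result dicts merged via dict.update) by an iterative
-- worklist DFS with an explicit stack of visit/edge items and one result accumulator (objective:
-- alternative). Both Pythons mutate the passed-in `visited` set identically; the equivalence
-- proved here is about the return value.

-- ===== PORT A =====
-- shared helpers of the module, used verbatim by both implementations

-- path.lstrip("./"): PySem has no lstrip-with-a-char-set; hand port, exact: drop leading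
-- characters that are '.' or '/' (Python lstrip(chars) treats chars as a set).
def lstripDotSlash (path : String) : String :=
  String.ofList (path.toList.dropWhile (fun c => c == '.' || c == '/'))

def normalizePath (path : String) : String :=
  let p := lstripDotSlash path
  if !([".coffee", ".js", ".ts"].any (fun ext => PySem.Str.endswith p ext)) then
    -- for ext in [".coffee", ".js"]: if f"{path}{ext}" in path: return f"{path}{ext}"
    match [".coffee", ".js"].find? (fun ext => PySem.Str.isIn (p ++ ext) p) with
    | some ext => p ++ ext
    | none => p
  else p

def findFileInGraph (graph : List (String × List (String × String × String))) (searchPath : String) : Option String :=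
  let normalized := normalizePath searchPath
  -- exact match: `normalized in graph` (dict key membership)
  if graph.any (fun p => p.1 == normalized) then some normalized
  else
    -- partial match: first key with file.endswith(normalized) or normalized in file
    (graph.map Prod.fst).find? (fun f => PySem.Str.endswith f normalized || PySem.Str.isIn normalized f)

-- A's recursion; fuel only makes the depth-bounded recursion structural: with the fuel
-- trace_imports passes, fuel runs out exactly where `depth > max_depth` already returns {}.
def traceA (graph : List (String × List (String × String × String))) (max_depth : Int) :
    Nat → String → List String → Int →
    (PySem.Dict String (List (String × String × String)) × List String)
  | 0, _, vis, _ => (PySem.Dict.mk [], vis)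
  | fuel+1, file, vis, depth =>
    if vis.contains file || depth > max_depth then (PySem.Dict.mk [], vis)
    else
      let vis1 := PySem.Set.add vis file
      match graph.find? (fun p => p.1 == file) with
      | none => (PySem.Dict.mk [], vis1)   -- `file in graph` false: result stays {}
      | some pr =>
        -- result[file] = graph[file]; then the edge loop, with the live visited set
        pr.2.foldl
          (fun st e =>
            if e.2.2 != "" && !(st.2.contains e.2.2) then
              match findFileInGraph graph e.2.2 with
              | some rf =>
                if rf != "" then   -- Python truthiness of resolved_file: None and "" are falsy
                  let c := traceA graph max_depth fuel rf st.2 (depth+1)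
                  (c.1.items.foldl (fun d kv => d.insert kv.1 kv.2) st.1, c.2)  -- result.update(child)
                else st
              | none => st
            else st)
          ((PySem.Dict.mk []).insert file pr.2, vis1)

def trace_imports (graph : List (String × List (String × String × String))) (file : String) (visited : Option (List String)) (depth : Int) (max_depth : Int) : List (String × List (String × String × String)) :=
  let vis := visited.getD []     -- if visited is None: visited = set()
  (traceA graph max_depth ((max_depth - depth).toNat + 1) file vis depth).1.items

-- ===== PORT B =====
-- worklist items: a node to visit, or a pending edge (resolved string, depth of its source)
inductive PvItem : Type
  | visit : String → Int → PvItem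
  | edge : String → Int → PvItem
deriving DecidableEq, Repr

-- termination measure for the worklist loop
def pvKeysLeft (graph : List (String × List (String × String × String))) (vis : List String) : Nat :=
  ((graph.map Prod.fst).toFinset \ vis.toFinset).card

def pvTotalEdges (graph : List (String × List (String × String × String))) : Nat :=
  (graph.map (fun p => p.2.length)).sum

def pvW : PvItem → Nat
  | .visit _ _ => 1
  | .edge _ _ => 2

lemma pvW_edges_sum (d : Int) (l : List (String × String × String)) :
    (List.map (pvW ∘ fun e => PvItem.edge e.2.2 d) l).sum = 2 * l.length := by
  induction l with
  | nil => simp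
  | cons a t ih => simp [pvW, Function.comp, ih] at *; omega

def pvMeasure (graph : List (String × List (String × String × String))) (stack : List PvItem) (vis : List String) : Nat :=
  pvKeysLeft graph vis * (2 * pvTotalEdges graph + 2) + (stack.map pvW).sum

lemma pv_not_mem_of_contains_false {vis : List String} {f : String} (hnv : vis.contains f = false) : f ∉ vis := by
  intro hmem
  have := List.contains_iff_mem.mpr hmem
  rw [hnv] at this
  exact absurd this (by decide)

lemma pvKeysLeft_add_le (graph : List (String × List (String × String × String))) (vis : List String) (f : String) :
    pvKeysLeft graph (PySem.Set.add vis f) ≤ pvKeysLeft graph vis := by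
  apply Finset.card_le_card
  apply Finset.sdiff_subset_sdiff (Finset.Subset.refl _)
  intro x hx
  simp only [List.mem_toFinset] at *
  unfold PySem.Set.add
  split
  · exact hx
  · exact List.mem_append_left _ hx

lemma pvKeysLeft_add_lt (graph : List (String × List (String × String × String))) (vis : List String) (f : String)
    (hf : f ∈ graph.map Prod.fst) (hnv : vis.contains f = false) :
    pvKeysLeft graph (PySem.Set.add vis f) < pvKeysLeft graph vis := by
  have hnm : f ∉ vis := pv_not_mem_of_contains_false hnv
  have hadd : PySem.Set.add vis f = vis ++ [f] := by simp [PySem.Set.add, hnm]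
  have hsub : (graph.map Prod.fst).toFinset \ (PySem.Set.add vis f).toFinset ⊆
      (((graph.map Prod.fst).toFinset \ vis.toFinset).erase f) := by
    intro x hx
    simp only [hadd, Finset.mem_sdiff, List.mem_toFinset, List.mem_append, Finset.mem_erase,
      List.mem_singleton, not_or] at *
    tauto
  calc pvKeysLeft graph (PySem.Set.add vis f) ≤ _ := Finset.card_le_card hsub
    _ < pvKeysLeft graph vis := by
        apply Finset.card_erase_lt_of_mem
        simp only [Finset.mem_sdiff, List.mem_toFinset]
        exact ⟨hf, hnm⟩

lemma pvEdges_le_total (graph : List (String × List (String × String × String)))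
    (pr : String × List (String × String × String)) (h : pr ∈ graph) :
    pr.2.length ≤ pvTotalEdges graph := by
  unfold pvTotalEdges
  exact List.single_le_sum (by simp) _ (List.mem_map_of_mem h)

-- the worklist loop: pop the top item; a visit item replays A's call entry, an edge item
-- replays one iteration of A's edge loop against the live visited set
def loopB (graph : List (String × List (String × String × String))) (max_depth : Int) :
    List PvItem → List String → List (String × List (String × String × String)) →
    List (String × List (String × String × String))
  | [], _, acc => acc
  | PvItem.visit f d :: k, vis, acc =>
    if vis.contains f || d > max_depth then loopB graph max_depth k vis acc
    else
      let vis1 := PySem.Set.add vis f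
      match hpr : graph.find? (fun p => p.1 == f) with
      | none => loopB graph max_depth k vis1 acc
      | some pr =>
        loopB graph max_depth (pr.2.map (fun e => PvItem.edge e.2.2 d) ++ k) vis1 (acc ++ [(f, pr.2)])
  | PvItem.edge r d :: k, vis, acc =>
    if r != "" && !(vis.contains r) then
      match findFileInGraph graph r with
      | some rf =>
        if rf != "" then loopB graph max_depth (PvItem.visit rf (d+1) :: k) vis acc
        else loopB graph max_depth k vis acc
      | none => loopB graph max_depth k vis acc
    else loopB graph max_depth k vis acc
  termination_by stack vis _ => pvMeasure graph stack vis
  decreasing_by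
  · simp only [pvMeasure, List.map_cons, List.sum_cons, pvW]; omega
  · have := pvKeysLeft_add_le graph vis f
    simp only [pvMeasure, List.map_cons, List.sum_cons, pvW]
    nlinarith [Nat.zero_le (pvTotalEdges graph)]
  · have hguard : vis.contains f = false := by
      rename_i hg
      simp only [Bool.or_eq_true, not_or, Bool.not_eq_true, decide_eq_true_eq] at hg
      exact hg.1
    have hmem : pr ∈ graph := List.mem_of_find?_eq_some hpr
    have hkey : pr.1 = f := by
      have := List.find?_some hpr
      simpa using this
    have hlt := pvKeysLeft_add_lt graph vis f (hkey ▸ List.mem_map_of_mem hmem) hguard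
    have hle := pvEdges_le_total graph pr hmem
    simp only [pvMeasure, List.map_cons, List.sum_cons, List.map_append, List.sum_append,
      List.map_map, pvW, pvW_edges_sum]
    nlinarith
  · simp only [pvMeasure, List.map_cons, List.sum_cons, pvW]; omega
  · simp only [pvMeasure, List.map_cons, List.sum_cons, pvW]; omega
  · simp only [pvMeasure, List.map_cons, List.sum_cons, pvW]; omega

def trace_imports_alt (graph : List (String × List (String × String × String))) (file : String) (visited : Option (List String)) (depth : Int) (max_depth : Int) : List (String × List (String × String × String)) :=
  let vis := visited.getD []     -- if visited is None: visited = set()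
  loopB graph max_depth [PvItem.visit file depth] vis []

-- ===== PRECONDITION & SPEC =====
def Spec_trace_imports (graph : List (String × List (String × String × String))) (file : String) (visited : Option (List String)) (depth : Int) (max_depth : Int) (out : List (String × List (String × String × String))) : Prop := out = trace_imports_alt graph file visited depth max_depth
instance (graph : List (String × List (String × String × String))) (file : String) (visited : Option (List String)) (depth : Int) (max_depth : Int) (out : List (String × List (String × String × String))) : Decidable (Spec_trace_imports graph file visited depth max_depth out) := by unfold Spec_trace_imports; infer_instance

-- ===== CLAIM (what is proved, stated in full; the proofs are below) =====
def Claim_equal_trace_imports : Prop := ∀ (graph : List (String × List (String × String × String))) (file : String) (visited : Option (List String)) (depth : Int) (max_depth : Int), Dom_trace_imports graph file visited depth max_depth → Spec_trace_imports graph file visited depth max_depth (trace_imports graph file visited depth max_depth)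

-- ===== LEMMAS AND PROOFS =====

-- single-step unfoldings of the worklist loop, one per branch
lemma loopB_visit_skip (graph : List (String × List (String × String × String))) (max_depth : Int)
    (f : String) (d : Int) (k : List PvItem) (vis : List String)
    (acc : List (String × List (String × String × String)))
    (hg : (vis.contains f || decide (d > max_depth)) = true) :
    loopB graph max_depth (PvItem.visit f d :: k) vis acc = loopB graph max_depth k vis acc := by
  conv_lhs => rw [loopB]
  simp only [hg, if_true]

lemma loopB_visit_none (graph : List (String × List (String × String × String))) (max_depth : Int)
    (f : String) (d : Int) (k : List PvItem) (vis : List String)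
    (acc : List (String × List (String × String × String)))
    (hg : (vis.contains f || decide (d > max_depth)) = false)
    (hfind : graph.find? (fun p => p.1 == f) = none) :
    loopB graph max_depth (PvItem.visit f d :: k) vis acc =
      loopB graph max_depth k (PySem.Set.add vis f) acc := by
  conv_lhs => rw [loopB]
  simp only [hg, Bool.false_eq_true, if_false]
  split
  · rfl
  · rename_i pr heq
    rw [hfind] at heq
    exact absurd heq (by simp)

lemma loopB_visit_found (graph : List (String × List (String × String × String))) (max_depth : Int)
    (f : String) (d : Int) (k : List PvItem) (vis : List String)
    (acc : List (String × List (String × String × String)))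
    (pr : String × List (String × String × String))
    (hg : (vis.contains f || decide (d > max_depth)) = false)
    (hfind : graph.find? (fun p => p.1 == f) = some pr) :
    loopB graph max_depth (PvItem.visit f d :: k) vis acc =
      loopB graph max_depth (pr.2.map (fun e => PvItem.edge e.2.2 d) ++ k)
        (PySem.Set.add vis f) (acc ++ [(f, pr.2)]) := by
  conv_lhs => rw [loopB]
  simp only [hg, Bool.false_eq_true, if_false]
  split
  · rename_i heq
    rw [hfind] at heq
    exact absurd heq (by simp)
  · rename_i pr' heq
    rw [hfind] at heq
    cases heq
    rfl

lemma loopB_edge_skip (graph : List (String × List (String × String × String))) (max_depth : Int)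
    (r : String) (d : Int) (k : List PvItem) (vis : List String)
    (acc : List (String × List (String × String × String)))
    (hg : (r != "" && !(vis.contains r)) = false) :
    loopB graph max_depth (PvItem.edge r d :: k) vis acc = loopB graph max_depth k vis acc := by
  conv_lhs => rw [loopB]
  simp only [hg, Bool.false_eq_true, if_false]

lemma loopB_edge_none (graph : List (String × List (String × String × String))) (max_depth : Int)
    (r : String) (d : Int) (k : List PvItem) (vis : List String)
    (acc : List (String × List (String × String × String)))
    (hg : (r != "" && !(vis.contains r)) = true)
    (hff : findFileInGraph graph r = none) :
    loopB graph max_depth (PvItem.edge r d :: k) vis acc = loopB graph max_depth k vis acc := by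
  conv_lhs => rw [loopB]
  simp only [hg, if_true, hff]

lemma loopB_edge_empty (graph : List (String × List (String × String × String))) (max_depth : Int)
    (r : String) (d : Int) (k : List PvItem) (vis : List String)
    (acc : List (String × List (String × String × String))) (rf : String)
    (hg : (r != "" && !(vis.contains r)) = true)
    (hff : findFileInGraph graph r = some rf) (hrf : (rf != "") = false) :
    loopB graph max_depth (PvItem.edge r d :: k) vis acc = loopB graph max_depth k vis acc := by
  conv_lhs => rw [loopB]
  simp only [hg, if_true, hff, hrf, Bool.false_eq_true, if_false]

lemma loopB_edge_found (graph : List (String × List (String × String × String))) (max_depth : Int)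
    (r : String) (d : Int) (k : List PvItem) (vis : List String)
    (acc : List (String × List (String × String × String))) (rf : String)
    (hg : (r != "" && !(vis.contains r)) = true)
    (hff : findFileInGraph graph r = some rf) (hrf : (rf != "") = true) :
    loopB graph max_depth (PvItem.edge r d :: k) vis acc =
      loopB graph max_depth (PvItem.visit rf (d+1) :: k) vis acc := by
  conv_lhs => rw [loopB]
  simp only [hg, if_true, hff, hrf]

-- combined invariant + simulation, proved by induction on A's fuel:
-- the visited set only grows; the keys of A's result dict are fresh (not visited on entry,
-- visited on exit) and duplicate-free; and with enough fuel, popping `visit f d` from B's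
-- stack advances the loop exactly by A's call.
def pvSim (graph : List (String × List (String × String × String))) (max_depth : Int) (fuel : Nat) : Prop :=
  ∀ (f : String) (vis : List String) (d : Int),
    (∃ ext, (traceA graph max_depth fuel f vis d).2 = vis ++ ext) ∧
    (∀ key ∈ (traceA graph max_depth fuel f vis d).1.keys,
        key ∉ vis ∧ key ∈ (traceA graph max_depth fuel f vis d).2) ∧
    (traceA graph max_depth fuel f vis d).1.keys.Nodup ∧
    ((max_depth - d + 1).toNat ≤ fuel →
      ∀ (k : List PvItem) (acc : List (String × List (String × String × String))),
        loopB graph max_depth (PvItem.visit f d :: k) vis acc =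
          loopB graph max_depth k (traceA graph max_depth fuel f vis d).2
            (acc ++ (traceA graph max_depth fuel f vis d).1.items))

-- A's edge-loop body, named so the fold can be reasoned about (identical to the lambda in traceA)
def pvStep (graph : List (String × List (String × String × String))) (max_depth : Int) (fuel : Nat) (d : Int)
    (st : PySem.Dict String (List (String × String × String)) × List String) (e : String × String × String) :
    PySem.Dict String (List (String × String × String)) × List String :=
  if e.2.2 != "" && !(st.2.contains e.2.2) then
    match findFileInGraph graph e.2.2 with
    | some rf =>
      if rf != "" then
        let c := traceA graph max_depth fuel rf st.2 (d+1)
        (c.1.items.foldl (fun d kv => d.insert kv.1 kv.2) st.1, c.2)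
      else st
    | none => st
  else st

lemma pvFold (graph : List (String × List (String × String × String))) (max_depth : Int) (fuel : Nat)
    (IH : pvSim graph max_depth fuel) (d : Int) :
    ∀ (es : List (String × String × String)) (vis : List String)
      (res : PySem.Dict String (List (String × String × String))),
      (∀ key ∈ res.keys, key ∈ vis) → res.keys.Nodup →
      (∃ ext, (es.foldl (pvStep graph max_depth fuel d) (res, vis)).2 = vis ++ ext) ∧
      (∃ tail, (es.foldl (pvStep graph max_depth fuel d) (res, vis)).1.items = res.items ++ tail ∧
        (∀ key ∈ tail.map Prod.fst, key ∉ vis ∧ key ∈ (es.foldl (pvStep graph max_depth fuel d) (res, vis)).2) ∧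
        (es.foldl (pvStep graph max_depth fuel d) (res, vis)).1.keys.Nodup) ∧
      ((max_depth - (d+1) + 1).toNat ≤ fuel → ∀ (k : List PvItem) (acc : List (String × List (String × String × String))),
        loopB graph max_depth (es.map (fun e => PvItem.edge e.2.2 d) ++ k) vis (acc ++ res.items) =
        loopB graph max_depth k (es.foldl (pvStep graph max_depth fuel d) (res, vis)).2
          (acc ++ (es.foldl (pvStep graph max_depth fuel d) (res, vis)).1.items)) := by
  intro es
  induction es with
  | nil =>
    intro vis res hkv hnd
    refine ⟨⟨[], by simp⟩, ⟨[], by simp, by simp, by simpa using hnd⟩, ?_⟩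
    intro _ k acc
    simp only [List.map_nil, List.nil_append, List.foldl_nil]
  | cons e es ihes =>
    intro vis res hkv hnd
    simp only [List.foldl_cons, List.map_cons, List.cons_append]
    by_cases hg : (e.2.2 != "" && !(vis.contains e.2.2)) = true
    · -- the edge guard passes
      rcases hf : findFileInGraph graph e.2.2 with _ | rf
      · -- no file found: state unchanged
        have hstep : pvStep graph max_depth fuel d (res, vis) e = (res, vis) := by
          simp only [pvStep, hg, if_true, hf]
        rw [hstep]
        obtain ⟨h1, h2, h3⟩ := ihes vis res hkv hnd
        refine ⟨h1, h2, ?_⟩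
        intro hdf k acc
        rw [loopB_edge_none graph max_depth e.2.2 d _ vis _ hg hf]
        exact h3 hdf k acc
      · by_cases hrf : (rf != "") = true
        · -- recurse into the found file
          have hstep : pvStep graph max_depth fuel d (res, vis) e =
              ((traceA graph max_depth fuel rf vis (d+1)).1.items.foldl
                 (fun d kv => d.insert kv.1 kv.2) res,
               (traceA graph max_depth fuel rf vis (d+1)).2) := by
            simp only [pvStep, hg, if_true, hf, hrf]
          obtain ⟨⟨cext, hcext⟩, hck, hcnd, hcsim⟩ := IH rf vis (d+1)
          -- child keys are fresh for res
          have hfresh : ∀ a ∈ (traceA graph max_depth fuel rf vis (d+1)).1.items,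
              res.contains a.1 = false := by
            intro a ha
            have hak : a.1 ∈ (traceA graph max_depth fuel rf vis (d+1)).1.keys := by
              simp only [PySem.Dict.keys]; exact List.mem_map_of_mem ha
            have := (hck a.1 hak).1
            rcases hcon : res.contains a.1 with _ | _
            · rfl
            · exact absurd (hkv a.1 ((PySem.Dict.contains_iff_mem_keys res a.1).mp hcon)) this
          have hcknd : ((traceA graph max_depth fuel rf vis (d+1)).1.items.map Prod.fst).Nodup := by
            simpa [PySem.Dict.keys] using hcnd
          have hupd : ((traceA graph max_depth fuel rf vis (d+1)).1.items.foldl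
              (fun d kv => d.insert kv.1 kv.2) res).items =
              res.items ++ (traceA graph max_depth fuel rf vis (d+1)).1.items := by
            have := PySem.Dict.items_foldl_insert_fresh
              (traceA graph max_depth fuel rf vis (d+1)).1.items Prod.fst Prod.snd res hfresh hcknd
            simpa using this
          have hkeys' : ((traceA graph max_depth fuel rf vis (d+1)).1.items.foldl
              (fun d kv => d.insert kv.1 kv.2) res).keys =
              res.keys ++ (traceA graph max_depth fuel rf vis (d+1)).1.keys := by
            simp only [PySem.Dict.keys, hupd, List.map_append]
          -- invariant hypotheses for the rest of the fold
          have hkv' : ∀ key ∈ ((traceA graph max_depth fuel rf vis (d+1)).1.items.foldl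
              (fun d kv => d.insert kv.1 kv.2) res).keys,
              key ∈ (traceA graph max_depth fuel rf vis (d+1)).2 := by
            intro key hkey
            rw [hkeys'] at hkey
            rcases List.mem_append.mp hkey with h | h
            · rw [hcext]; exact List.mem_append_left _ (hkv key h)
            · exact (hck key h).2
          have hnd' : ((traceA graph max_depth fuel rf vis (d+1)).1.items.foldl
              (fun d kv => d.insert kv.1 kv.2) res).keys.Nodup := by
            rw [hkeys']
            refine List.Nodup.append hnd hcnd ?_
            intro key h1 h2
            exact (hck key h2).1 (hkv key h1)
          obtain ⟨⟨ext2, hext2⟩, ⟨tail2, htail2, htail2p, hnd2⟩, hsim2⟩ :=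
            ihes (traceA graph max_depth fuel rf vis (d+1)).2
              ((traceA graph max_depth fuel rf vis (d+1)).1.items.foldl
                (fun d kv => d.insert kv.1 kv.2) res) hkv' hnd'
          rw [hstep]
          refine ⟨⟨cext ++ ext2, by rw [hext2, hcext, List.append_assoc]⟩, ?_, ?_⟩
          · refine ⟨(traceA graph max_depth fuel rf vis (d+1)).1.items ++ tail2, ?_, ?_, hnd2⟩
            · rw [htail2, hupd, List.append_assoc]
            · intro key hkey
              rw [List.map_append] at hkey
              rcases List.mem_append.mp hkey with h | h
              · have hck' := hck key (by simpa only [PySem.Dict.keys] using h)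
                refine ⟨hck'.1, ?_⟩
                rw [hext2]
                exact List.mem_append_left _ hck'.2
              · have := htail2p key h
                refine ⟨?_, this.2⟩
                intro hmem
                exact this.1 (by rw [hcext]; exact List.mem_append_left _ hmem)
          · intro hdf k acc
            rw [loopB_edge_found graph max_depth e.2.2 d _ vis _ rf hg hf hrf]
            rw [hcsim hdf (es.map (fun e => PvItem.edge e.2.2 d) ++ k) (acc ++ res.items)]
            rw [show (acc ++ res.items) ++ (traceA graph max_depth fuel rf vis (d+1)).1.items =
                acc ++ ((traceA graph max_depth fuel rf vis (d+1)).1.items.foldl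
                  (fun d kv => d.insert kv.1 kv.2) res).items from by
              rw [hupd, List.append_assoc]]
            exact hsim2 hdf k acc
        · -- resolved_file is "" (falsy): skip
          have hrfb : (rf != "") = false := by simpa using hrf
          have hstep : pvStep graph max_depth fuel d (res, vis) e = (res, vis) := by
            simp only [pvStep, hg, if_true, hf, hrfb, Bool.false_eq_true, if_false]
          rw [hstep]
          obtain ⟨h1, h2, h3⟩ := ihes vis res hkv hnd
          refine ⟨h1, h2, ?_⟩
          intro hdf k acc
          rw [loopB_edge_empty graph max_depth e.2.2 d _ vis _ rf hg hf hrfb]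
          exact h3 hdf k acc
    · -- guard fails: state unchanged
      have hgb : (e.2.2 != "" && !(vis.contains e.2.2)) = false := by simpa using hg
      have hstep : pvStep graph max_depth fuel d (res, vis) e = (res, vis) := by
        simp only [pvStep, hgb, Bool.false_eq_true, if_false]
      rw [hstep]
      obtain ⟨h1, h2, h3⟩ := ihes vis res hkv hnd
      refine ⟨h1, h2, ?_⟩
      intro hdf k acc
      rw [loopB_edge_skip graph max_depth e.2.2 d _ vis _ hgb]
      exact h3 hdf k acc

theorem pvSim_all (graph : List (String × List (String × String × String))) (max_depth : Int) :
    ∀ fuel, pvSim graph max_depth fuel := by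
  intro fuel
  induction fuel with
  | zero =>
    intro f vis d
    refine ⟨⟨[], by simp [traceA]⟩, by simp [traceA, PySem.Dict.keys], by simp [traceA, PySem.Dict.keys], ?_⟩
    intro hfd k acc
    have hd : d > max_depth := by omega
    rw [loopB_visit_skip graph max_depth f d k vis acc (by simp [hd])]
    simp [traceA, PySem.Dict.keys]
  | succ fuel IH =>
    intro f vis d
    by_cases hgv : (vis.contains f || decide (d > max_depth)) = true
    · -- call returns {} immediately
      have hA : traceA graph max_depth (fuel+1) f vis d = (PySem.Dict.mk [], vis) := by
        simp only [traceA, hgv, if_true]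
      refine ⟨⟨[], by simp [hA]⟩, by simp [hA, PySem.Dict.keys], by simp [hA, PySem.Dict.keys], ?_⟩
      intro hfd k acc
      rw [loopB_visit_skip graph max_depth f d k vis acc hgv]
      simp [hA, PySem.Dict.keys]
    · have hgvb : (vis.contains f || decide (d > max_depth)) = false := by simpa using hgv
      have hnc : vis.contains f = false := by
        rcases Bool.or_eq_false_iff.mp hgvb with ⟨h1, _⟩
        exact h1
      have hdle : ¬ d > max_depth := by
        rcases Bool.or_eq_false_iff.mp hgvb with ⟨_, h2⟩
        simpa using h2
      have hnm : f ∉ vis := pv_not_mem_of_contains_false hnc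
      have hadd : PySem.Set.add vis f = vis ++ [f] := by simp [PySem.Set.add, hnm]
      rcases hfind : graph.find? (fun p => p.1 == f) with _ | pr
      · -- file not in graph
        have hA : traceA graph max_depth (fuel+1) f vis d = (PySem.Dict.mk [], PySem.Set.add vis f) := by
          simp only [traceA, hgvb, Bool.false_eq_true, if_false, hfind]
        refine ⟨⟨[f], by simp [hA, hadd]⟩, by simp [hA, PySem.Dict.keys], by simp [hA, PySem.Dict.keys], ?_⟩
        intro hfd k acc
        rw [loopB_visit_none graph max_depth f d k vis acc hgvb hfind]
        simp [hA, PySem.Dict.keys]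
      · -- file in graph: the edge loop
        have hA : traceA graph max_depth (fuel+1) f vis d =
            pr.2.foldl (pvStep graph max_depth fuel d)
              ((PySem.Dict.mk []).insert f pr.2, PySem.Set.add vis f) := by
          simp only [traceA, hgvb, Bool.false_eq_true, if_false, hfind]
          rfl
        have hres0 : ((PySem.Dict.mk [] : PySem.Dict String (List (String × String × String))).insert f pr.2).items = [(f, pr.2)] := by
          simp [PySem.Dict.items_insert_of_not_contains]
        have hres0k : ((PySem.Dict.mk [] : PySem.Dict String (List (String × String × String))).insert f pr.2).keys = [f] := by
          simp only [PySem.Dict.keys, hres0, List.map_cons, List.map_nil]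
        have hkv0 : ∀ key ∈ ((PySem.Dict.mk [] : PySem.Dict String (List (String × String × String))).insert f pr.2).keys, key ∈ PySem.Set.add vis f := by
          intro key hkey
          rw [hres0k] at hkey
          simp only [List.mem_singleton] at hkey
          subst hkey
          rw [hadd]
          exact List.mem_append_right _ (by simp)
        have hnd0 : ((PySem.Dict.mk [] : PySem.Dict String (List (String × String × String))).insert f pr.2).keys.Nodup := by
          rw [hres0k]; simp
        obtain ⟨⟨ext, hext⟩, ⟨tail, htail, htailp, hndf⟩, hsim⟩ :=
          pvFold graph max_depth fuel IH d pr.2 (PySem.Set.add vis f)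
            ((PySem.Dict.mk []).insert f pr.2) hkv0 hnd0
        rw [hA]
        refine ⟨⟨[f] ++ ext, by rw [hext, hadd, List.append_assoc]⟩, ?_, hndf, ?_⟩
        · intro key hkey
          have hitems : (pr.2.foldl (pvStep graph max_depth fuel d)
              ((PySem.Dict.mk []).insert f pr.2, PySem.Set.add vis f)).1.items = [(f, pr.2)] ++ tail := by
            rw [htail, hres0]
          have hkey' : key ∈ ([(f, pr.2)] ++ tail).map Prod.fst := by
            simpa only [PySem.Dict.keys, hitems] using hkey
          rw [List.map_append] at hkey'
          rcases List.mem_append.mp hkey' with h | h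
          · simp only [List.map_cons, List.map_nil, List.mem_singleton] at h
            subst h
            refine ⟨hnm, ?_⟩
            rw [hext, hadd]
            exact List.mem_append_left _ (List.mem_append_right _ (by simp))
          · have := htailp key h
            refine ⟨?_, this.2⟩
            intro hmem
            exact this.1 (by rw [hadd]; exact List.mem_append_left _ hmem)
        · intro hfd k acc
          have hdf : (max_depth - (d+1) + 1).toNat ≤ fuel := by omega
          rw [loopB_visit_found graph max_depth f d k vis acc pr hgvb hfind]
          rw [show acc ++ [(f, pr.2)] = acc ++ ((PySem.Dict.mk [] : PySem.Dict String (List (String × String × String))).insert f pr.2).items from by rw [hres0]]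
          exact hsim hdf k acc

-- ===== VERDICT (by name: the statement is the Claim_ definition above) =====
theorem trace_imports_spec : Claim_equal_trace_imports := by
  intro graph file visited depth max_depth _
  unfold Spec_trace_imports trace_imports trace_imports_alt
  have h := pvSim_all graph max_depth ((max_depth - depth).toNat + 1) file (visited.getD []) depth
  have hfuel : (max_depth - depth + 1).toNat ≤ (max_depth - depth).toNat + 1 := by omega
  have hs := h.2.2.2 hfuel [] []
  simp only [List.nil_append] at hs
  simp only [hs, loopB]
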